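-- pv_equiv track=rewrite | github.com/supriyachola/AI-Agent-Development-Challenge-support-system | faq_agent (1)/scripts/add_categories.py | infer_category
-- ===== SOURCE A (Python) =====
-- def infer_category(tags):
--     tags = [t.lower() for t in (tags or [])]
--     if any(t in tags for t in ("sale", "sales", "pricing", "enterprise", "subscription", "trial")):
--         return "sales"
--     if any(t in tags for t in ("marketing", "campaign", "analytics", "leads", "email")):
--         return "marketing"
--     if any(t in tags for t in ("support", "account", "password", "troubleshooting", "onboarding", "crm", "integration", "technical")):
--         return "support"
--     if any(t in tags for t in ("billing", "refund", "payment", "invoice")):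
--         return "billing"
--     if any(t in tags for t in ("technical", "offline", "network", "app")):
--         return "technical"
--     return "general"
-- ===== SOURCE B (Python) =====
-- GROUPS = [
--     ("sales", ("sale", "sales", "pricing", "enterprise", "subscription", "trial")),
--     ("marketing", ("marketing", "campaign", "analytics", "leads", "email")),
--     ("support", ("support", "account", "password", "troubleshooting", "onboarding", "crm", "integration", "technical")),
--     ("billing", ("billing", "refund", "payment", "invoice")),
--     ("technical", ("technical", "offline", "network", "app")),
-- ]
--
-- def infer_category(tags):
--     # One pass over the tags, keeping the highest-priority (lowest-index) matching group.
--     best = None  # (priority, category name)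
--     for t in (tags or []):
--         tl = t.lower()
--         for i, (name, kws) in enumerate(GROUPS):
--             if tl in kws:
--                 if best is None or i < best[0]:
--                     best = (i, name)
--                 break
--     return best[1] if best is not None else "general"
-- ===== Notes on version B (the rewrite author's own statement) =====
-- stated objective: alternative
-- what changed: A scans the tag list once per category group in priority order with early return; B builds a priority-ordered keyword table and makes a single pass over the tags, keeping the minimum-priority matching group (loop interchange: iterate tags, not groups).
import Mathlib
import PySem

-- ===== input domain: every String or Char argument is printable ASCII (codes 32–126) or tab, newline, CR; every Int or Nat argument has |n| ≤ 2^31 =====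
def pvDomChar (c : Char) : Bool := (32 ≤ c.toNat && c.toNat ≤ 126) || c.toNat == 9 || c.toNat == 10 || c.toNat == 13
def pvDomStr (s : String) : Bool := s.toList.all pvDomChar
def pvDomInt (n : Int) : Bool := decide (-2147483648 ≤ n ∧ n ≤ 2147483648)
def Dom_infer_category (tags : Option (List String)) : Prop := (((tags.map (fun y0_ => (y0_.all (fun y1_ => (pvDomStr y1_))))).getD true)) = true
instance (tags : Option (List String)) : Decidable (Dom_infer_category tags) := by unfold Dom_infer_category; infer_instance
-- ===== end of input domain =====

-- B replaces A's per-category scans of the tag list (early return) by a single pass over the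
-- tags, keeping the minimum-priority matching keyword group (objective: alternative decomposition).

-- ===== PORT A =====
def infer_category (tags : Option (List String)) : String :=
  let tl := (tags.getD []).map PySem.Str.lower
  if ["sale", "sales", "pricing", "enterprise", "subscription", "trial"].any (fun k => tl.contains k) then "sales"
  else if ["marketing", "campaign", "analytics", "leads", "email"].any (fun k => tl.contains k) then "marketing"
  else if ["support", "account", "password", "troubleshooting", "onboarding", "crm", "integration", "technical"].any (fun k => tl.contains k) then "support"
  else if ["billing", "refund", "payment", "invoice"].any (fun k => tl.contains k) then "billing"
  else if ["technical", "offline", "network", "app"].any (fun k => tl.contains k) then "technical"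
  else "general"

-- ===== PORT B =====
-- the five keyword groups of Source B's GROUPS table, in priority order
def pvK0 : List String := ["sale", "sales", "pricing", "enterprise", "subscription", "trial"]
def pvK1 : List String := ["marketing", "campaign", "analytics", "leads", "email"]
def pvK2 : List String := ["support", "account", "password", "troubleshooting", "onboarding", "crm", "integration", "technical"]
def pvK3 : List String := ["billing", "refund", "payment", "invoice"]
def pvK4 : List String := ["technical", "offline", "network", "app"]

def pvGroups : List (String × List String) :=
  [("sales", pvK0), ("marketing", pvK1), ("support", pvK2), ("billing", pvK3), ("technical", pvK4)]

-- inner loop of B: 'for i, (name, kws) in enumerate(GROUPS): if tl in kws: … break'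
def pvFindGroup (tl : String) : Option (Int × (String × List String)) :=
  (PySem.List.enumerate pvGroups).find? (fun p => p.2.2.contains tl)

-- body of B's outer loop for one tag
def pvStep (best : Option (Int × String)) (t : String) : Option (Int × String) :=
  match pvFindGroup (PySem.Str.lower t) with
  | none => best
  | some (i, (name, _)) =>
    match best with
    | none => some (i, name)
    | some (b, bn) => if i < b then some (i, name) else some (b, bn)

def infer_category_alt (tags : Option (List String)) : String :=
  match (tags.getD []).foldl pvStep none with
  | none => "general"
  | some (_, name) => name

-- ===== PRECONDITION & SPEC =====
def Spec_infer_category (tags : Option (List String)) (out : String) : Prop := out = infer_category_alt tags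
instance (tags : Option (List String)) (out : String) : Decidable (Spec_infer_category tags out) := by unfold Spec_infer_category; infer_instance

-- ===== CLAIM (what is proved, stated in full; the proofs are below) =====
def Claim_equal_infer_category : Prop := ∀ (tags : Option (List String)), Dom_infer_category tags → Spec_infer_category tags (infer_category tags)

-- ===== LEMMAS AND PROOFS =====

-- A's condition for one group, as a function of the raw tag list
def pvCond (g : List String) (L : List String) : Bool :=
  g.any (fun k => (L.map PySem.Str.lower).contains k)

-- left-biased minimum (by priority) of two optional (priority, name) pairs
def pvOmin (a b : Option (Int × String)) : Option (Int × String) :=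
  match b with
  | none => a
  | some (i, n) =>
    match a with
    | none => some (i, n)
    | some (p, pn) => if i < p then some (i, n) else some (p, pn)

lemma pvStep_eq (best : Option (Int × String)) (t : String) :
    pvStep best t = pvOmin best ((pvFindGroup (PySem.Str.lower t)).map (fun p => (p.1, p.2.1))) := by
  unfold pvStep pvOmin
  cases pvFindGroup (PySem.Str.lower t) with
  | none => rfl
  | some p => rcases p with ⟨i, name, kws⟩; cases best <;> rfl

lemma pvOmin_assoc (a b c : Option (Int × String)) :
    pvOmin (pvOmin a b) c = pvOmin a (pvOmin b c) := by
  rcases a with _ | ⟨x, xn⟩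
  all_goals rcases b with _ | ⟨y, yn⟩
  all_goals rcases c with _ | ⟨z, zn⟩
  all_goals try rfl
  all_goals simp only [pvOmin]
  all_goals split_ifs <;> try simp only []
  all_goals try split_ifs
  all_goals first | rfl | omega

lemma pvOmin_none_right (a : Option (Int × String)) : pvOmin a none = a := rfl

lemma pvOmin_none_left (a : Option (Int × String)) : pvOmin none a = a := by
  rcases a with _ | ⟨i, n⟩ <;> rfl

lemma pvFoldl_decomp (L : List String) : ∀ acc,
    L.foldl pvStep acc = pvOmin acc (L.foldl pvStep none) := by
  induction L with
  | nil => intro acc; simp [List.foldl, pvOmin_none_right]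
  | cons t L ih =>
    intro acc
    rw [List.foldl_cons, List.foldl_cons, ih (pvStep acc t), ih (pvStep none t), pvStep_eq,
      pvStep_eq, pvOmin_none_left, pvOmin_assoc]

-- the invariant characterising B's fold result by A's five conditions
def pvInv (L : List String) : Prop :=
  (L.foldl pvStep none = none ∧ pvCond pvK0 L = false ∧ pvCond pvK1 L = false ∧
      pvCond pvK2 L = false ∧ pvCond pvK3 L = false ∧ pvCond pvK4 L = false)
  ∨ (L.foldl pvStep none = some (0, "sales") ∧ pvCond pvK0 L = true)
  ∨ (L.foldl pvStep none = some (1, "marketing") ∧ pvCond pvK0 L = false ∧ pvCond pvK1 L = true)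
  ∨ (L.foldl pvStep none = some (2, "support") ∧ pvCond pvK0 L = false ∧ pvCond pvK1 L = false ∧
      pvCond pvK2 L = true)
  ∨ (L.foldl pvStep none = some (3, "billing") ∧ pvCond pvK0 L = false ∧ pvCond pvK1 L = false ∧
      pvCond pvK2 L = false ∧ pvCond pvK3 L = true)
  ∨ (L.foldl pvStep none = some (4, "technical") ∧ pvCond pvK0 L = false ∧ pvCond pvK1 L = false ∧
      pvCond pvK2 L = false ∧ pvCond pvK3 L = false ∧ pvCond pvK4 L = true)

lemma pvCond_cons (g : List String) (t : String) (L : List String) :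
    pvCond g (t :: L) = (g.contains (PySem.Str.lower t) || pvCond g L) := by
  simp only [pvCond, List.map_cons]
  rw [Bool.eq_iff_iff]
  simp [List.any_eq_true, List.mem_cons]
  aesop

lemma pvFindGroup_eq (x : String) :
    pvFindGroup x =
      if pvK0.contains x then some (0, ("sales", pvK0))
      else if pvK1.contains x then some (1, ("marketing", pvK1))
      else if pvK2.contains x then some (2, ("support", pvK2))
      else if pvK3.contains x then some (3, ("billing", pvK3))
      else if pvK4.contains x then some (4, ("technical", pvK4))
      else none := by
  unfold pvFindGroup pvGroups
  simp only [PySem.List.enumerate_cons, PySem.List.enumerate_nil, List.find?]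
  cases h0 : pvK0.contains x <;> cases h1 : pvK1.contains x <;> cases h2 : pvK2.contains x <;>
    cases h3 : pvK3.contains x <;> cases h4 : pvK4.contains x <;> simp

lemma pvInv_holds (L : List String) : pvInv L := by
  induction L with
  | nil => left; exact ⟨rfl, rfl, rfl, rfl, rfl, rfl⟩
  | cons t L ih =>
    have hR : (t :: L).foldl pvStep none =
        pvOmin ((pvFindGroup (PySem.Str.lower t)).map (fun p => (p.1, p.2.1))) (L.foldl pvStep none) := by
      rw [List.foldl_cons, pvFoldl_decomp, pvStep_eq, pvOmin_none_left]
    unfold pvInv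
    rw [hR, pvFindGroup_eq, pvCond_cons, pvCond_cons, pvCond_cons, pvCond_cons, pvCond_cons]
    by_cases h0 : pvK0.contains (PySem.Str.lower t) <;>
      by_cases h1 : pvK1.contains (PySem.Str.lower t) <;>
        by_cases h2 : pvK2.contains (PySem.Str.lower t) <;>
          by_cases h3 : pvK3.contains (PySem.Str.lower t) <;>
            by_cases h4 : pvK4.contains (PySem.Str.lower t) <;>
              rcases ih with ⟨hr, hc⟩ | ⟨hr, hc⟩ | ⟨hr, hc⟩ | ⟨hr, hc⟩ | ⟨hr, hc⟩ | ⟨hr, hc⟩ <;>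
                simp_all [pvOmin]

-- ===== VERDICT (by name: the statement is the Claim_ definition above) =====
theorem infer_category_spec : Claim_equal_infer_category := by
  intro tags _
  unfold Spec_infer_category infer_category infer_category_alt
  have h := pvInv_holds (tags.getD [])
  unfold pvInv at h
  rcases h with ⟨hr, h0, h1, h2, h3, h4⟩ | ⟨hr, h0⟩ | ⟨hr, h0, h1⟩ | ⟨hr, h0, h1, h2⟩ |
    ⟨hr, h0, h1, h2, h3⟩ | ⟨hr, h0, h1, h2, h3, h4⟩ <;>
    simp only [pvCond, pvK0, pvK1, pvK2, pvK3, pvK4] at * <;>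
    rw [hr] <;>
    simp only [*, Bool.false_eq_true, reduceIte]
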